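-- pv_equiv track=rewrite | github.com/MrBrantCode/unitest_baseline | mut_generate/mist_train_cf/cf_44023/solution.py | create_pyramid
-- ===== SOURCE A (Python) =====
-- def create_pyramid(n, sequence, extra=0):
--     blocks = [n + extra]
--     for i in range(1, n):
--         if sequence == 'consecutive':
--             blocks.append(blocks[-1] + i + 1)
--         elif sequence == 'square':
--             blocks.append(blocks[-1] + (i + 1)**2)
--     return blocks
-- ===== SOURCE B (Python) =====
-- def create_pyramid(n, sequence, extra=0):
--     base = n + extra
--     if sequence == 'consecutive':
--         return [base] + [base + (k + 1) * (k + 2) // 2 - 1 for k in range(1, n)]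
--     if sequence == 'square':
--         return [base] + [base + (k + 1) * (k + 2) * (2 * k + 3) // 6 - 1 for k in range(1, n)]
--     return [base]
-- ===== Notes on version B (the rewrite author's own statement) =====
-- stated objective: simpler
-- what changed: Replaced the running-total append loop with the base block plus a comprehension computing each later block directly from the closed form of the cumulative sum (triangular / square-pyramidal numbers).
import Mathlib
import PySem

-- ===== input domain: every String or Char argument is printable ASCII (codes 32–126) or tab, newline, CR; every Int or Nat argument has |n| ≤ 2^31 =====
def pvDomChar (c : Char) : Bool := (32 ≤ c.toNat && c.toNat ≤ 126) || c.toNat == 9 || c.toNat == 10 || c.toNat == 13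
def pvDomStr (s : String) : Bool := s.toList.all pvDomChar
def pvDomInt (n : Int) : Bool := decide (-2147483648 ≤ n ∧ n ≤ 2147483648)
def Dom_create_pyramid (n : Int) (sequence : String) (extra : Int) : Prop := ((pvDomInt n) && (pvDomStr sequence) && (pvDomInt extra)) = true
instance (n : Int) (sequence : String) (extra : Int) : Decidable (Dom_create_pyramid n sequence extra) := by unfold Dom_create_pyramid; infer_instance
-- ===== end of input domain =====

-- B replaces A's running-total append loop with the base block plus a closed-form comprehension (simpler).

-- ===== PORT A =====
-- blocks[-1] is ported as pyGetD blocks (-1) 0; blocks is always nonempty, so this is exact.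
def create_pyramid (n : Int) (sequence : String) (extra : Int) : List Int :=
  (PySem.List.pyRange 1 n 1).foldl
    (fun blocks i =>
      if sequence == "consecutive" then
        blocks ++ [PySem.List.pyGetD blocks (-1) 0 + i + 1]
      else if sequence == "square" then
        blocks ++ [PySem.List.pyGetD blocks (-1) 0 + (i + 1) ^ 2]
      else blocks)
    [n + extra]

-- ===== PORT B =====
def create_pyramid_alt (n : Int) (sequence : String) (extra : Int) : List Int :=
  let base := n + extra
  if sequence == "consecutive" then
    [base] ++ (PySem.List.pyRange 1 n 1).map
      (fun k => base + PySem.Int.floordiv ((k + 1) * (k + 2)) 2 - 1)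
  else if sequence == "square" then
    [base] ++ (PySem.List.pyRange 1 n 1).map
      (fun k => base + PySem.Int.floordiv ((k + 1) * (k + 2) * (2 * k + 3)) 6 - 1)
  else [base]

-- ===== PRECONDITION & SPEC =====
def Spec_create_pyramid (n : Int) (sequence : String) (extra : Int) (out : List Int) : Prop := out = create_pyramid_alt n sequence extra
instance (n : Int) (sequence : String) (extra : Int) (out : List Int) : Decidable (Spec_create_pyramid n sequence extra out) := by unfold Spec_create_pyramid; infer_instance

-- ===== CLAIM (what is proved, stated in full; the proofs are below) =====
def Claim_equal_create_pyramid : Prop := ∀ (n : Int) (sequence : String) (extra : Int), Dom_create_pyramid n sequence extra → Spec_create_pyramid n sequence extra (create_pyramid n sequence extra)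

-- ===== LEMMAS AND PROOFS =====

-- consecutive: the cumulative loop equals the triangular-number closed form
lemma consec_loop (base : Int) : ∀ m : Int, 1 ≤ m →
    (PySem.List.pyRange 1 m 1).foldl
      (fun blocks i => blocks ++ [PySem.List.pyGetD blocks (-1) 0 + i + 1]) [base]
    = (PySem.List.pyRange 0 m 1).map
      (fun k => base + PySem.Int.floordiv ((k + 1) * (k + 2)) 2 - 1) := by
  intro m hm
  induction m, hm using Int.le_induction with
  | base =>
      have h0 : PySem.List.pyRange 0 1 1 = [0] := by decide
      rw [PySem.List.pyRange_one_eq_nil (by omega), h0]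
      simp
  | succ m hm ih =>
      rw [PySem.List.pyRange_one_succ_right (by omega : (1:Int) ≤ m),
          List.foldl_append, ih]
      have hsplit : PySem.List.pyRange 0 (m + 1) 1
          = PySem.List.pyRange 0 m 1 ++ [m] :=
        PySem.List.pyRange_one_succ_right (by omega)
      rw [hsplit, List.map_append]
      have hprev : PySem.List.pyRange 0 m 1
          = PySem.List.pyRange 0 (m - 1) 1 ++ [m - 1] := by
        have := PySem.List.pyRange_one_succ_right
          (a := 0) (b := m - 1) (by omega)
        simpa using this
      rw [hprev, List.map_append]
      simp only [List.foldl_cons, List.foldl_nil, List.map_cons, List.map_nil,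
        List.append_assoc]
      rw [PySem.List.pyGetD_neg_one_append_singleton]
      have h1 : PySem.Int.floordiv ((m - 1 + 1) * (m - 1 + 2)) 2
          = m * (m + 1) / 2 := by
        rw [PySem.Int.floordiv_eq_ediv_of_pos (by omega)]; ring_nf
      have h2 : PySem.Int.floordiv ((m + 1) * (m + 2)) 2
          = (m * (m + 1) + (m + 1) * 2) / 2 := by
        rw [PySem.Int.floordiv_eq_ediv_of_pos (by omega)]; ring_nf
      have key : base + PySem.Int.floordiv ((m - 1 + 1) * (m - 1 + 2)) 2 - 1 + m + 1
          = base + PySem.Int.floordiv ((m + 1) * (m + 2)) 2 - 1 := by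
        rw [h1, h2, Int.add_mul_ediv_right _ _ (by omega : (2:Int) ≠ 0)]; ring
      rw [key]

-- square: the cumulative loop equals the square-pyramidal closed form
lemma square_loop (base : Int) : ∀ m : Int, 1 ≤ m →
    (PySem.List.pyRange 1 m 1).foldl
      (fun blocks i => blocks ++ [PySem.List.pyGetD blocks (-1) 0 + (i + 1) ^ 2]) [base]
    = (PySem.List.pyRange 0 m 1).map
      (fun k => base + PySem.Int.floordiv ((k + 1) * (k + 2) * (2 * k + 3)) 6 - 1) := by
  intro m hm
  induction m, hm using Int.le_induction with
  | base =>
      have h0 : PySem.List.pyRange 0 1 1 = [0] := by decide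
      rw [PySem.List.pyRange_one_eq_nil (by omega), h0]
      simp
  | succ m hm ih =>
      rw [PySem.List.pyRange_one_succ_right (by omega : (1:Int) ≤ m),
          List.foldl_append, ih]
      have hsplit : PySem.List.pyRange 0 (m + 1) 1
          = PySem.List.pyRange 0 m 1 ++ [m] :=
        PySem.List.pyRange_one_succ_right (by omega)
      rw [hsplit, List.map_append]
      have hprev : PySem.List.pyRange 0 m 1
          = PySem.List.pyRange 0 (m - 1) 1 ++ [m - 1] := by
        have := PySem.List.pyRange_one_succ_right
          (a := 0) (b := m - 1) (by omega)
        simpa using this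
      rw [hprev, List.map_append]
      simp only [List.foldl_cons, List.foldl_nil, List.map_cons, List.map_nil,
        List.append_assoc]
      rw [PySem.List.pyGetD_neg_one_append_singleton]
      have h1 : PySem.Int.floordiv ((m - 1 + 1) * (m - 1 + 2) * (2 * (m - 1) + 3)) 6
          = (m * (m + 1) * (2 * m + 1)) / 6 := by
        rw [PySem.Int.floordiv_eq_ediv_of_pos (by omega)]; ring_nf
      have h2 : PySem.Int.floordiv ((m + 1) * (m + 2) * (2 * m + 3)) 6
          = (m * (m + 1) * (2 * m + 1) + (m + 1) ^ 2 * 6) / 6 := by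
        rw [PySem.Int.floordiv_eq_ediv_of_pos (by omega)]; ring_nf
      have key : base + PySem.Int.floordiv ((m - 1 + 1) * (m - 1 + 2) * (2 * (m - 1) + 3)) 6 - 1 + (m + 1) ^ 2
          = base + PySem.Int.floordiv ((m + 1) * (m + 2) * (2 * m + 3)) 6 - 1 := by
        rw [h1, h2, Int.add_mul_ediv_right _ _ (by omega : (6:Int) ≠ 0)]; ring
      rw [key]

-- peel the k = 0 head off the closed-form map: the 0-th block is just base
lemma map_zero_cons (base m : Int) (hm : 1 ≤ m)
    (f : Int → Int) (hf : f 0 = base) :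
    (PySem.List.pyRange 0 m 1).map f = base :: (PySem.List.pyRange 1 m 1).map f := by
  rw [PySem.List.pyRange_one_cons (by omega : (0:Int) < m)]
  simp [hf]

-- ===== VERDICT (by name: the statement is the Claim_ definition above) =====
theorem create_pyramid_spec : Claim_equal_create_pyramid := by
  intro n sequence extra _
  unfold Spec_create_pyramid create_pyramid create_pyramid_alt
  by_cases hc : sequence = "consecutive"
  · subst hc
    by_cases hn : 1 ≤ n
    · have h := consec_loop (n + extra) n hn
      rw [map_zero_cons (n + extra) n hn _ (by norm_num [PySem.Int.floordiv_eq_ediv_of_pos])] at h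
      simpa using h
    · simp [PySem.List.pyRange_one_eq_nil (show n ≤ 1 by omega)]
  · by_cases hs : sequence = "square"
    · subst hs
      by_cases hn : 1 ≤ n
      · have h := square_loop (n + extra) n hn
        rw [map_zero_cons (n + extra) n hn _ (by norm_num [PySem.Int.floordiv_eq_ediv_of_pos])] at h
        simpa using h
      · simp [PySem.List.pyRange_one_eq_nil (show n ≤ 1 by omega)]
    · simp [hc, hs, List.foldl_fixed]
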